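-- pv_equiv track=rewrite | github.com/ShubingLiu0213/comp110-22s-workspace | lessons/dictionaries.py | favoriate
-- ===== SOURCE A (Python) =====
-- def favoriate(d: dict[str, str]) -> str:
--     counter: list[str] = list()
--     new_dict: dict[str, int] = {}
--     i: int = 0
--     for key in d:
--         counter.append(key)
--     for item in counter:
--         if item in new_dict:
--             new_dict[item] += 1
--         if item not in new_dict:
--             new_dict[item] = 1
--         a = []
--         a.append(new_dict[item])
--         max = a[0]
--         while i < len(a):
--             if a[i] > max:
--                 max = a[i]
--             i += 1
--     return counter[i]
-- ===== SOURCE B (Python) =====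
-- def favoriate(d: dict[str, str]) -> str:
--     return list(d)[1]
-- ===== Notes on version B (the rewrite author's own statement) =====
-- stated objective: simpler
-- what changed: A's two loops, dead counter dict and mismanaged while loop always leave i = 1, so B returns the second key directly with a single indexed access list(d)[1].
-- outside the precondition, e.g. on favoriate({}): A raises IndexError, B raises IndexError; on favoriate({'a': 'x'}): A raises IndexError, B raises IndexError
import Mathlib
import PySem

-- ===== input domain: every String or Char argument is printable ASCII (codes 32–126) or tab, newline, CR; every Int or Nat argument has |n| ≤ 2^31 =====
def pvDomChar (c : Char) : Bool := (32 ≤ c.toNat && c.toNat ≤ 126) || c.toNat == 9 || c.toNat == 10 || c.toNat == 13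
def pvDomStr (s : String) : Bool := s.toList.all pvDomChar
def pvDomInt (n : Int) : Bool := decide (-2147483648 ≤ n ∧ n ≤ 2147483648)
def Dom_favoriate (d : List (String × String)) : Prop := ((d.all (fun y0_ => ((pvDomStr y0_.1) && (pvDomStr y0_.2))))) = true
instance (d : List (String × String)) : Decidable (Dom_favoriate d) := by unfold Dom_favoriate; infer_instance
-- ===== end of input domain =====

-- B replaces A's two loops, dead counter dict and while loop (which always leave i = 1)
-- by a single indexed access to the key list: simpler, same behaviour.

-- ===== PORT A =====
-- the inner 'while i < len(a): if a[i] > max: max = a[i]; i += 1' loop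
def pvWhileA (a : List Int) (i max : Int) : Int × Int :=
  if _h : i < (a.length : Int) then
    let ai := PySem.List.pyGetD a i 0   -- a[i]; always in range while the loop runs
    pvWhileA a (i + 1) (if ai > max then ai else max)
  else (i, max)
termination_by ((a.length : Int) - i).toNat
decreasing_by omega

-- one iteration of 'for item in counter'
def pvStepA (st : PySem.Dict String Int × Int) (item : String) : PySem.Dict String Int × Int :=
  let nd := st.1
  let i := st.2
  let nd := if nd.contains item then nd.modify item 0 (· + 1) else nd   -- new_dict[item] += 1
  let nd := if nd.contains item then nd else nd.insert item 1           -- new_dict[item] = 1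
  let a : List Int := [] ++ [nd.getD item 0]                            -- a = []; a.append(new_dict[item])
  let max := PySem.List.pyGetD a 0 0                                    -- max = a[0]; a nonempty
  (nd, (pvWhileA a i max).1)

def favoriate (d : List (String × String)) : String :=
  -- counter = []; for key in d: counter.append(key)  (dict iteration: distinct keys in insertion order)
  let counter : List String := PySem.List.dedup (d.map Prod.fst)
  let i := (counter.foldl pvStepA (PySem.Dict.empty, 0)).2
  PySem.List.pyGetD counter i ""   -- counter[i]; in range by Pre_

-- ===== PORT B =====
def favoriate_alt (d : List (String × String)) : String :=
  -- return list(d)[1]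
  PySem.List.pyGetD (PySem.List.dedup (d.map Prod.fst)) 1 ""

-- ===== PRECONDITION & SPEC =====
-- A raises IndexError (counter[i] with i past the end) when the dict has fewer than 2 keys; B raises there too.
def Pre_favoriate (d : List (String × String)) : Prop :=
  2 ≤ (PySem.List.dedup (d.map Prod.fst)).length
instance (d : List (String × String)) : Decidable (Pre_favoriate d) := by unfold Pre_favoriate; infer_instance
def pvWitness_favoriate : (List (String × String)) := [("a", "x"), ("b", "y")]

def Spec_favoriate (d : List (String × String)) (out : String) : Prop := out = favoriate_alt d
instance (d : List (String × String)) (out : String) : Decidable (Spec_favoriate d out) := by unfold Spec_favoriate; infer_instance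

-- ===== CLAIM (what is proved, stated in full; the proofs are below) =====
def Claim_equal_favoriate : Prop := ∀ (d : List (String × String)), Dom_favoriate d → Pre_favoriate d → Spec_favoriate d (favoriate d)

-- ===== LEMMAS AND PROOFS =====

-- the while loop on the singleton a with i = 1 does not run
theorem pvWhileA_one (v m : Int) : pvWhileA [v] 1 m = (1, m) := by
  unfold pvWhileA; simp

-- the while loop on the singleton a with i = 0 runs once, leaving i = 1
theorem pvWhileA_zero (v m : Int) : (pvWhileA [v] 0 m).1 = 1 := by
  unfold pvWhileA; simp [pvWhileA_one]

theorem pvStepA_snd_zero (nd : PySem.Dict String Int) (item : String) :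
    (pvStepA (nd, 0) item).2 = 1 := by
  unfold pvStepA; simp [pvWhileA_zero]

theorem pvStepA_snd_one (nd : PySem.Dict String Int) (item : String) :
    (pvStepA (nd, 1) item).2 = 1 := by
  unfold pvStepA; simp [pvWhileA_one]

theorem foldl_pvStepA_snd (l : List String) (nd : PySem.Dict String Int) :
    (l.foldl pvStepA (nd, 1)).2 = 1 := by
  induction l generalizing nd with
  | nil => rfl
  | cons x xs ih =>
    rcases h : pvStepA (nd, 1) x with ⟨nd', i'⟩
    have hi : i' = 1 := by have := pvStepA_snd_one nd x; rw [h] at this; exact this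
    simp only [List.foldl_cons, h, hi, ih]

theorem favoriate_i (l : List String) :
    (l.foldl pvStepA (PySem.Dict.empty, 0)).2 = if l = [] then 0 else 1 := by
  cases l with
  | nil => rfl
  | cons x xs =>
    simp only [List.foldl_cons, reduceCtorEq, reduceIte]
    rcases h : pvStepA (PySem.Dict.empty, 0) x with ⟨nd', i'⟩
    have hi : i' = 1 := by have := pvStepA_snd_zero PySem.Dict.empty x; rw [h] at this; exact this
    rw [hi, foldl_pvStepA_snd]

-- ===== VERDICT (by name: the statement is the Claim_ definition above) =====
theorem favoriate_spec : Claim_equal_favoriate := by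
  intro d _hdom hpre
  unfold Spec_favoriate favoriate favoriate_alt
  simp only []
  have hne : PySem.List.dedup (d.map Prod.fst) ≠ [] := by
    intro h
    unfold Pre_favoriate at hpre
    rw [h] at hpre; simp at hpre
  rw [favoriate_i, if_neg hne]
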